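-- pv_equiv track=rewrite | github.com/Ch3m1stryK1ng/binagent | tools/validate_ida_script.py | check_required_functions
-- ===== SOURCE A (Python) =====
-- def check_required_functions(script: str) -> list:
--     """Check that all expected functions are defined."""
--     required_functions = [
--         'log', 'get_basic_info', 'apply_libc_prototypes',
--         'get_cfunc', 'get_pseudocode_at_address', 'get_full_pseudocode',
--         'rename_variables_in_function', 'get_disasm_context',
--         'identify_input_source', 'get_callee_name',
--         'analyze_call_for_overflow', 'analyze_call_for_format_string',
--         'analyze_malloc_for_integer_overflow', 'track_free_sites',
--         'find_uaf_patterns', 'scan_all_functions', 'deduplicate_findings',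
--         'assign_finding_ids', 'annotate_database', 'generate_why_explanation',
--         'generate_findings_json', 'generate_evidence_md',
--         'generate_pseudocode_export', 'save_database', 'main'
--     ]
--
--     missing = []
--     for func in required_functions:
--         if f"def {func}(" not in script:
--             missing.append(func)
--
--     return missing
-- ===== SOURCE B (Python) =====
-- def check_required_functions(script: str) -> list:
--     """Check that all expected functions are defined."""
--     required_functions = [
--         'log', 'get_basic_info', 'apply_libc_prototypes',
--         'get_cfunc', 'get_pseudocode_at_address', 'get_full_pseudocode',
--         'rename_variables_in_function', 'get_disasm_context',
--         'identify_input_source', 'get_callee_name',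
--         'analyze_call_for_overflow', 'analyze_call_for_format_string',
--         'analyze_malloc_for_integer_overflow', 'track_free_sites',
--         'find_uaf_patterns', 'scan_all_functions', 'deduplicate_findings',
--         'assign_finding_ids', 'annotate_database', 'generate_why_explanation',
--         'generate_findings_json', 'generate_evidence_md',
--         'generate_pseudocode_export', 'save_database', 'main'
--     ]
--
--     # One pass over the script: collect every name that appears as "def <name>("
--     # into a set, then filter the required list against that index.
--     def is_word(c):
--         return c.isalnum() or c == '_'
--
--     defined = set()
--     n = len(script)
--     i = 0
--     while i < n:
--         if script.startswith('def ', i):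
--             j = i + 4
--             k = j
--             while k < n and is_word(script[k]):
--                 k += 1
--             if k > j and k < n and script[k] == '(':
--                 defined.add(script[j:k])
--                 i = k + 1
--                 continue
--         i += 1
--
--     return [f for f in required_functions if f not in defined]
-- ===== Notes on version B (the rewrite author's own statement) =====
-- stated objective: alternative
-- what changed: Instead of running 24 separate substring searches of the whole script, B scans the script once, collecting every defined function name (a word after a def keyword and followed by an open parenthesis) into a set, and then filters the fixed required list by set membership.
import Mathlib
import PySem

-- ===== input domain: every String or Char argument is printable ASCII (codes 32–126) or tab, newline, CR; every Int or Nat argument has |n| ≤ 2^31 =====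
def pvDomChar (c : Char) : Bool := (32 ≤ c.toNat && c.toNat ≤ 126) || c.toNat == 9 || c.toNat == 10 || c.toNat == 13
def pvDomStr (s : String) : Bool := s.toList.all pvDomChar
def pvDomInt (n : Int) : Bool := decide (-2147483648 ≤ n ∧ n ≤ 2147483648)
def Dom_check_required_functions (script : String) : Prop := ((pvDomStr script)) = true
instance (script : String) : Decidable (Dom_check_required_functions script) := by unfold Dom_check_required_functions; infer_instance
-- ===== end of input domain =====

-- B replaces A's 24 whole-script substring searches by one scan that collects every "def <name>(" name
-- into a set and filters the fixed required list against it (alternative algorithm, same results).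


-- ===== PORT A =====
def check_required_functions (script : String) : List String :=
  let required_functions : List String :=
    ["log", "get_basic_info", "apply_libc_prototypes",
     "get_cfunc", "get_pseudocode_at_address", "get_full_pseudocode",
     "rename_variables_in_function", "get_disasm_context",
     "identify_input_source", "get_callee_name",
     "analyze_call_for_overflow", "analyze_call_for_format_string",
     "analyze_malloc_for_integer_overflow", "track_free_sites",
     "find_uaf_patterns", "scan_all_functions", "deduplicate_findings",
     "assign_finding_ids", "annotate_database", "generate_why_explanation",
     "generate_findings_json", "generate_evidence_md",
     "generate_pseudocode_export", "save_database", "main"]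
  -- for func in required_functions: if f"def {func}(" not in script: missing.append(func)
  required_functions.foldl
    (fun missing func =>
      if !(PySem.Str.isIn ("def " ++ func ++ "(") script) then missing ++ [func] else missing)
    []

-- ===== PORT B =====
-- script[k].isalnum() or script[k] == '_'  (exact on the ASCII domain)
def pvIsWord (c : Char) : Bool := c.isAlphanum || c == '_'

-- B's while-loop over index i, as recursion on the remaining character list:
-- at a "def " hit, take the word characters after it, and if a nonempty word is
-- followed by '(' add it to the set and resume after the '('; otherwise advance one char.
-- (Python set of strings modelled as PySem.Set over the name's character list.)
def pvScanDefs : List Char → PySem.Set (List Char) → PySem.Set (List Char)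
  | [], acc => acc
  | c :: t, acc =>
    if ['d', 'e', 'f', ' '].isPrefixOf (c :: t) then
      if (t.drop 3).takeWhile pvIsWord ≠ [] ∧ ((t.drop 3).dropWhile pvIsWord).head? = some '(' then
        pvScanDefs ((t.drop 3).dropWhile pvIsWord).tail
          (PySem.Set.add acc ((t.drop 3).takeWhile pvIsWord))
      else pvScanDefs t acc
    else pvScanDefs t acc
  termination_by cs _ => cs.length
  decreasing_by
  · rename_i h
    have h1 := List.length_dropWhile_le pvIsWord (t.drop 3)
    have h2 : ((t.drop 3).dropWhile pvIsWord) ≠ [] := by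
      intro hnil; rw [hnil] at h; simp at h
    have h3 : (t.drop 3).length = t.length - 3 := List.length_drop
    have h4 : ((t.drop 3).dropWhile pvIsWord).tail.length = ((t.drop 3).dropWhile pvIsWord).length - 1 :=
      List.length_tail
    have h5 : 0 < ((t.drop 3).dropWhile pvIsWord).length := List.length_pos_of_ne_nil h2
    simp only [List.length_cons]
    omega
  · simp
  · simp

def check_required_functions_alt (script : String) : List String :=
  let required_functions : List String :=
    ["log", "get_basic_info", "apply_libc_prototypes",
     "get_cfunc", "get_pseudocode_at_address", "get_full_pseudocode",
     "rename_variables_in_function", "get_disasm_context",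
     "identify_input_source", "get_callee_name",
     "analyze_call_for_overflow", "analyze_call_for_format_string",
     "analyze_malloc_for_integer_overflow", "track_free_sites",
     "find_uaf_patterns", "scan_all_functions", "deduplicate_findings",
     "assign_finding_ids", "annotate_database", "generate_why_explanation",
     "generate_findings_json", "generate_evidence_md",
     "generate_pseudocode_export", "save_database", "main"]
  let defined := pvScanDefs script.toList PySem.Set.empty
  required_functions.filter (fun f => !(PySem.Set.contains defined f.toList))

-- ===== PRECONDITION & SPEC =====
def Spec_check_required_functions (script : String) (out : List String) : Prop := out = check_required_functions_alt script
instance (script : String) (out : List String) : Decidable (Spec_check_required_functions script out) := by unfold Spec_check_required_functions; infer_instance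

-- ===== CLAIM (what is proved, stated in full; the proofs are below) =====
def Claim_equal_check_required_functions : Prop := ∀ (script : String), Dom_check_required_functions script → Spec_check_required_functions script (check_required_functions script)

-- ===== LEMMAS AND PROOFS =====

-- the pattern "def w(" cannot start inside a run of word characters that ends at a '('
lemma pv_noPrefixMid (w xs t' : List Char) (hxs : ∀ c ∈ xs, pvIsWord c = true) :
    ¬ ('d' :: 'e' :: 'f' :: ' ' :: (w ++ ['('])) <+: (xs ++ '(' :: t') := by
  rintro ⟨s, hs⟩
  match xs, hxs with
  | [], _ => simp at hs
  | [a], _ => simp at hs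
  | [a, b], _ => simp at hs
  | [a, b, c], _ => simp at hs
  | a :: b :: c :: d :: xs', hxs =>
    simp at hs
    have hd : pvIsWord d = true := hxs d (by simp)
    rw [← hs.2.2.2.1] at hd
    exact absurd hd (by decide)

-- if "def w(" occurs in u ++ '(' :: t' with u all word characters, it occurs in t'
lemma pv_infixMid (w t' : List Char) :
    ∀ (u : List Char), (∀ c ∈ u, pvIsWord c = true) →
      ('d' :: 'e' :: 'f' :: ' ' :: (w ++ ['('])) <:+: (u ++ '(' :: t') →
      ('d' :: 'e' :: 'f' :: ' ' :: (w ++ ['('])) <:+: t' := by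
  intro u
  induction u with
  | nil =>
    intro _ h
    rcases List.infix_cons_iff.mp h with hp | h
    · exact absurd hp (pv_noPrefixMid w [] t' (by simp))
    · exact h
  | cons x u' ih =>
    intro hu h
    rcases List.infix_cons_iff.mp h with hp | h
    · exact absurd hp (pv_noPrefixMid w (x :: u') t' hu)
    · exact ih (fun c hc => hu c (by simp [hc])) h

-- takeWhile/dropWhile of w ++ '(' :: s when w is all word characters
lemma pv_takeWhile_word (w s : List Char) (hw : ∀ c ∈ w, pvIsWord c = true) :
    (w ++ '(' :: s).takeWhile pvIsWord = w ∧ (w ++ '(' :: s).dropWhile pvIsWord = '(' :: s := by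
  have ht : w.takeWhile pvIsWord = w := List.takeWhile_eq_self_iff.mpr hw
  constructor
  · rw [List.takeWhile_append, ht]
    simp [List.takeWhile_cons_of_neg, show pvIsWord '(' = false from rfl]
  · rw [List.dropWhile_append]
    have hd : w.dropWhile pvIsWord = [] := by
      rw [List.dropWhile_eq_nil_iff]; exact fun c hc => hw c hc
    simp [hd, List.dropWhile_cons_of_neg, show pvIsWord '(' = false from rfl]

-- one-character advance: if the pattern is not a prefix, occurrence in c :: t = occurrence in t
lemma pv_step (pat : List Char) (c : Char) (t : List Char)
    (hnp : ¬ pat <+: (c :: t)) : pat <:+: (c :: t) ↔ pat <:+: t := by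
  constructor
  · intro h
    rcases List.infix_cons_iff.mp h with hp | h
    · exact absurd hp hnp
    · exact h
  · intro h
    exact List.infix_cons_iff.mpr (Or.inr h)

-- main invariant: membership in the scanned set = occurrence of "def w(" (for a nonempty word w)
lemma pv_scan_mem (w : List Char) (hwne : w ≠ []) (hwW : ∀ c ∈ w, pvIsWord c = true) :
    ∀ (n : Nat) (cs : List Char) (acc : PySem.Set (List Char)), cs.length ≤ n →
      (w ∈ pvScanDefs cs acc ↔ ('d' :: 'e' :: 'f' :: ' ' :: (w ++ ['('])) <:+: cs ∨ w ∈ acc) := by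
  intro n
  induction n with
  | zero =>
    intro cs acc hlen
    have : cs = [] := List.eq_nil_of_length_eq_zero (Nat.le_zero.mp hlen)
    subst this
    simp [pvScanDefs]
  | succ n ih =>
    intro cs acc hlen
    match cs with
    | [] => simp [pvScanDefs]
    | c :: t =>
      have hlen' : t.length ≤ n := by simp at hlen; omega
      by_cases hpre : ['d', 'e', 'f', ' '].isPrefixOf (c :: t)
      · obtain ⟨rest, hrest⟩ := List.isPrefixOf_iff_prefix.mp hpre
        have hct : c = 'd' ∧ t = 'e' :: 'f' :: ' ' :: rest := by simpa using hrest.symm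
        obtain ⟨hc, ht⟩ := hct
        subst hc; subst ht
        -- the prefix case forces the scanner's word to be w
        have hprefix_word : ∀ s2, rest = w ++ '(' :: s2 →
            rest.takeWhile pvIsWord = w ∧ rest.dropWhile pvIsWord = '(' :: s2 := by
          intro s2 h2; subst h2; exact pv_takeWhile_word w s2 hwW
        have hdrop3 : (('e' :: 'f' :: ' ' :: rest) : List Char).drop 3 = rest := rfl
        rw [pvScanDefs, if_pos hpre, hdrop3]
        rcases hm : rest.dropWhile pvIsWord with _ | ⟨p, t2⟩
        · -- no character follows the word run: the pattern cannot be a prefix of cs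
          rw [if_neg (by simp)]
          rw [ih _ acc hlen']
          have hnp : ¬ ('d' :: 'e' :: 'f' :: ' ' :: (w ++ ['('])) <+:
              ('d' :: 'e' :: 'f' :: ' ' :: rest) := by
            rintro ⟨s, hs⟩
            have h2 : rest = w ++ '(' :: s := by simpa [List.append_assoc] using hs.symm
            have := (hprefix_word s h2).2
            rw [hm] at this; simp at this
          rw [pv_step _ _ _ hnp]
        · by_cases hp : p = '('
          · subst hp
            have hu : rest.takeWhile pvIsWord ++ '(' :: t2 = rest := by
              rw [← hm]; exact List.takeWhile_append_dropWhile
            have huW : ∀ c ∈ rest.takeWhile pvIsWord, pvIsWord c = true :=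
              fun c hc => List.mem_takeWhile_imp hc
            by_cases hue : rest.takeWhile pvIsWord = []
            · -- empty word: the scanner advances; the pattern cannot be a prefix (w ≠ [])
              rw [if_neg (by simp [hue])]
              rw [ih _ acc hlen']
              have hnp : ¬ ('d' :: 'e' :: 'f' :: ' ' :: (w ++ ['('])) <+:
                  ('d' :: 'e' :: 'f' :: ' ' :: rest) := by
                rintro ⟨s, hs⟩
                have h2 : rest = w ++ '(' :: s := by simpa [List.append_assoc] using hs.symm
                have := (hprefix_word s h2).1
                rw [hue] at this; exact hwne this.symm
              rw [pv_step _ _ _ hnp]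
            · -- successful match: add the word, resume after the '('
              rw [if_pos ⟨hue, rfl⟩]
              have ht2 : t2.length ≤ n := by
                have h1 := List.length_dropWhile_le pvIsWord rest
                rw [hm] at h1
                simp at h1 hlen
                omega
              rw [List.tail_cons, ih t2 _ ht2, PySem.Set.mem_add]
              revert hu hue huW
              generalize rest.takeWhile pvIsWord = u
              intro hu huW hue
              subst hu
              have htwu : (u ++ '(' :: t2).takeWhile pvIsWord = u :=
                (pv_takeWhile_word u t2 huW).1
              have hiff : ('d' :: 'e' :: 'f' :: ' ' :: (w ++ ['('])) <:+:
                  ('d' :: 'e' :: 'f' :: ' ' :: (u ++ '(' :: t2)) ↔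
                  ('d' :: 'e' :: 'f' :: ' ' :: (w ++ ['('])) <:+: t2 ∨ w = u := by
                constructor
                · intro h
                  rcases List.infix_cons_iff.mp h with hpf | h
                  · obtain ⟨s, hs⟩ := hpf
                    have h2 : u ++ '(' :: t2 = w ++ '(' :: s := by
                      simpa [List.append_assoc] using hs.symm
                    have hw2 := (hprefix_word s h2).1
                    rw [htwu] at hw2
                    exact Or.inr hw2.symm
                  · rcases List.infix_cons_iff.mp h with hpf | h
                    · obtain ⟨s, hs⟩ := hpf; simp at hs
                    · rcases List.infix_cons_iff.mp h with hpf | h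
                      · obtain ⟨s, hs⟩ := hpf; simp at hs
                      · rcases List.infix_cons_iff.mp h with hpf | h
                        · obtain ⟨s, hs⟩ := hpf; simp at hs
                        · exact Or.inl (pv_infixMid w t2 u huW h)
                · rintro (h | h)
                  · refine h.trans ⟨'d' :: 'e' :: 'f' :: ' ' :: (u ++ ['(']), [], ?_⟩
                    simp
                  · subst h
                    refine ⟨[], t2, ?_⟩
                    simp
              rw [hiff]
              tauto
          · -- the word run is followed by something other than '(': advance one character
            rw [if_neg (by simp [hp])]
            rw [ih _ acc hlen']
            have hnp : ¬ ('d' :: 'e' :: 'f' :: ' ' :: (w ++ ['('])) <+: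
                ('d' :: 'e' :: 'f' :: ' ' :: rest) := by
              rintro ⟨s, hs⟩
              have h2 : rest = w ++ '(' :: s := by simpa [List.append_assoc] using hs.symm
              have := (hprefix_word s h2).2
              rw [hm] at this
              simp at this
              exact hp this.1
            rw [pv_step _ _ _ hnp]
      · -- head is not "def ": the pattern cannot be a prefix; advance one character
        rw [pvScanDefs, if_neg hpre]
        rw [ih t acc hlen']
        have hnp : ¬ ('d' :: 'e' :: 'f' :: ' ' :: (w ++ ['('])) <+: (c :: t) := by
          intro hpf
          obtain ⟨s, hs⟩ := hpf
          exact hpre (List.isPrefixOf_iff_prefix.mpr ⟨w ++ ['('] ++ s, by simpa using hs⟩)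
        rw [pv_step _ _ _ hnp]

-- pointwise bridge: A's substring test equals B's set-membership test
lemma pv_pointwise (f : String) (h1 : f.toList ≠ []) (h2 : ∀ c ∈ f.toList, pvIsWord c = true)
    (script : String) :
    (!(PySem.Str.isIn ("def " ++ f ++ "(") script)) =
      (!(PySem.Set.contains (pvScanDefs script.toList PySem.Set.empty) f.toList)) := by
  congr 1
  rw [Bool.eq_iff_iff, PySem.Str.isIn_iff_infix, PySem.Set.contains_iff]
  have hsub : ("def " ++ f ++ "(").toList = 'd' :: 'e' :: 'f' :: ' ' :: (f.toList ++ ['(']) := by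
    simp
  rw [hsub]
  rw [pv_scan_mem f.toList h1 h2 script.toList.length script.toList PySem.Set.empty le_rfl]
  simp [PySem.Set.empty]

-- ===== VERDICT (by name: the statement is the Claim_ definition above) =====
set_option maxRecDepth 8192 in
theorem check_required_functions_spec : Claim_equal_check_required_functions := by
  intro script _
  unfold Spec_check_required_functions check_required_functions check_required_functions_alt
  rw [show (fun (missing : List String) (func : String) =>
        if !(PySem.Str.isIn ("def " ++ func ++ "(") script) then missing ++ [func] else missing) =
      (fun acc x => if (fun func => !(PySem.Str.isIn ("def " ++ func ++ "(") script)) x then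
        acc ++ [id x] else acc) from rfl]
  rw [PySem.List.foldl_append_if]
  simp only [List.map_id, List.nil_append]
  refine List.filter_congr ?_
  intro f hf
  refine pv_pointwise f ?_ ?_ script
  · fin_cases hf <;> simp
  · fin_cases hf <;> simp [pvIsWord]
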